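-- pv_equiv track=rewrite | github.com/cmarti/gpmap-tools | gpmap/graph.py | is_better_path
-- ===== SOURCE A (Python) =====
-- def is_better_path(w1, w2, is_sorted=False, only_min=False):
--     if not w1:
--         if not w2:
--             is_better = False
--         else:
--             is_better = True
--     elif not w2:
--         is_better = False
--     else:
--         if only_min:
--             return w1 > w2
--
--         else:
--             if not is_sorted:
--                 w1, w2 = sorted(w1), sorted(w2)
--             if w1[0] > w2[0]:
--                 is_better = True
--             elif w1[0] < w2[0]:
--                 is_better = False
--             else:
--                 is_better = is_better_path(w1[1:], w2[1:], is_sorted=True)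
--     return is_better
-- ===== SOURCE B (Python) =====
-- def is_better_path(w1, w2, is_sorted=False, only_min=False):
--     # empty cases first, exactly as the task requires: an empty path loses to any
--     # non-empty one, two empty paths tie
--     if not w1 or not w2:
--         return not w1 and bool(w2)
--     if only_min:
--         return w1 > w2
--     if not is_sorted:
--         w1, w2 = sorted(w1), sorted(w2)
--     # single pass over the paired elements, no slicing
--     for a, b in zip(w1, w2):
--         if a != b:
--             return a > b
--     return len(w1) < len(w2)
-- ===== Notes on version B (the rewrite author's own statement) =====
-- stated objective: simpler
-- what changed: Replaces A's recursion over copied list slices with guard clauses, one sort, and a single flat loop over zip(w1, w2) that returns at the first differing element and decides ties by length.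
import Mathlib
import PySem

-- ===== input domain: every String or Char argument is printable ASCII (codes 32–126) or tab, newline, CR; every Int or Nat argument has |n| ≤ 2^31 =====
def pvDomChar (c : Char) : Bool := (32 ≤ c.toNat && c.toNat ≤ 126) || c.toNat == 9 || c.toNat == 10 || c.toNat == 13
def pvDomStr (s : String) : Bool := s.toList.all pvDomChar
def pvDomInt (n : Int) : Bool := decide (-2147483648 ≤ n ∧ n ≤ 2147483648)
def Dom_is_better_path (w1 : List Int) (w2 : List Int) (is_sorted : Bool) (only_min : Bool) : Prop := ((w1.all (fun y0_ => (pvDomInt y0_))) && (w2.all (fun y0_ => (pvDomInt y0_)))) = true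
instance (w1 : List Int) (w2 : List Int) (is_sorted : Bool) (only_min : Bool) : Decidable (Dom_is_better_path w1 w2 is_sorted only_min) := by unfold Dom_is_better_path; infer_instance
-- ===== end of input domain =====

-- B replaces A's recursion over copied list slices with one sort followed by a
-- single flat pass over the zipped lists (objective: simpler).

-- ===== PORT A =====

-- Python's 'w1 > w2' on lists of ints (lexicographic, longer prefix wins); exact.
def pyListGt : List Int → List Int → Bool
  | [], _ => false
  | _ :: _, [] => true
  | a :: t1, b :: t2 => if a > b then true else if a < b then false else pyListGt t1 t2

def is_better_path (w1 : List Int) (w2 : List Int) (is_sorted : Bool) (only_min : Bool) : Bool :=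
  if w1 = [] then
    if w2 = [] then false else true
  else if w2 = [] then false
  else if only_min then pyListGt w1 w2
  else
    let s1 := if is_sorted then w1 else PySem.List.sorted w1 (fun x => x) false
    let s2 := if is_sorted then w2 else PySem.List.sorted w2 (fun x => x) false
    -- w1[0] / w2[0]: both lists are non-empty here, so headI is exactly the Python index 0
    if s1.headI > s2.headI then true
    else if s1.headI < s2.headI then false
    else is_better_path s1.tail s2.tail true false  -- w1[1:], w2[1:] (slice_from_one: the tail)
termination_by w1.length
decreasing_by
  simp only [List.length_tail]
  have hne : w1 ≠ [] := by assumption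
  have hp : 0 < w1.length := List.length_pos_iff.mpr hne
  split
  · omega
  · have hl := PySem.List.length_sorted w1 (fun x : Int => x) false
    omega

-- ===== PORT B =====

-- the for-loop over zip(w1, w2): first differing pair decides; if zip runs out,
-- compare the lengths of what remains (len(w1) < len(w2))
def lexScan : List Int → List Int → Bool
  | a :: t1, b :: t2 => if a ≠ b then a > b else lexScan t1 t2
  | l1, l2 => decide (l1.length < l2.length)

def is_better_path_alt (w1 : List Int) (w2 : List Int) (is_sorted : Bool) (only_min : Bool) : Bool :=
  if w1 = [] ∨ w2 = [] then (w1 = [] && w2 ≠ [] : Bool)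
  else if only_min then pyListGt w1 w2
  else
    let s1 := if is_sorted then w1 else PySem.List.sorted w1 (fun x => x) false
    let s2 := if is_sorted then w2 else PySem.List.sorted w2 (fun x => x) false
    lexScan s1 s2

-- ===== PRECONDITION & SPEC =====
def Spec_is_better_path (w1 : List Int) (w2 : List Int) (is_sorted : Bool) (only_min : Bool) (out : Bool) : Prop := out = is_better_path_alt w1 w2 is_sorted only_min
instance (w1 : List Int) (w2 : List Int) (is_sorted : Bool) (only_min : Bool) (out : Bool) : Decidable (Spec_is_better_path w1 w2 is_sorted only_min out) := by unfold Spec_is_better_path; infer_instance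

-- ===== CLAIM (what is proved, stated in full; the proofs are below) =====
def Claim_equal_is_better_path : Prop := ∀ (w1 : List Int) (w2 : List Int) (is_sorted : Bool) (only_min : Bool), Dom_is_better_path w1 w2 is_sorted only_min → Spec_is_better_path w1 w2 is_sorted only_min (is_better_path w1 w2 is_sorted only_min)

-- ===== LEMMAS AND PROOFS =====

-- A restricted to already-sorted inputs (is_sorted=true, only_min=false) is exactly lexScan
theorem isbp_sorted_eq_lexScan (l1 l2 : List Int) :
    is_better_path l1 l2 true false = lexScan l1 l2 := by
  induction l1 generalizing l2 with
  | nil => cases l2 <;> simp [is_better_path.eq_def, lexScan]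
  | cons a t1 ih =>
    cases l2 with
    | nil => simp [is_better_path.eq_def, lexScan]
    | cons b t2 =>
      rw [is_better_path.eq_def]
      simp only [lexScan, if_true, List.tail_cons, List.headI_cons,
        reduceCtorEq, if_false, ne_eq]
      by_cases hab : a = b
      · subst hab; simp [ih]
      · rcases lt_or_gt_of_ne hab with h | h
        · simp [not_lt_of_gt h, h, hab]
        · simp [h, hab]

-- ===== VERDICT (by name: the statement is the Claim_ definition above) =====
theorem is_better_path_spec : Claim_equal_is_better_path := by
  intro w1 w2 is_sorted only_min _
  unfold Spec_is_better_path
  cases w1 with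
  | nil => cases w2 <;> simp [is_better_path.eq_def, is_better_path_alt]
  | cons a t1 =>
    cases w2 with
    | nil => simp [is_better_path.eq_def, is_better_path_alt]
    | cons b t2 =>
      cases only_min with
      | true => rw [is_better_path.eq_def, is_better_path_alt]; simp
      | false =>
        rw [is_better_path.eq_def, is_better_path_alt]
        simp only [reduceCtorEq, or_self, if_false, Bool.false_eq_true]
        have key : ∀ s1 s2 : List Int, s1 ≠ [] → s2 ≠ [] →
            (if s1.headI > s2.headI then true
             else if s1.headI < s2.headI then false
             else is_better_path s1.tail s2.tail true false) = lexScan s1 s2 := by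
          intro s1 s2 h1 h2
          obtain ⟨x, xs, rfl⟩ := List.exists_cons_of_ne_nil h1
          obtain ⟨y, ys, rfl⟩ := List.exists_cons_of_ne_nil h2
          simp only [List.headI_cons, List.tail_cons, lexScan, ne_eq]
          by_cases hxy : x = y
          · subst hxy; simp [isbp_sorted_eq_lexScan]
          · rcases lt_or_gt_of_ne hxy with h | h
            · simp [not_lt_of_gt h, h, hxy]
            · simp [h, hxy]
        cases is_sorted with
        | true => simp only [if_true]; exact key _ _ (by simp) (by simp)
        | false =>
          simp only [Bool.false_eq_true, if_false]
          exact key _ _ (by simp [PySem.List.sorted_eq_nil_iff]) (by simp [PySem.List.sorted_eq_nil_iff])
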